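-- pv_equiv track=rewrite | github.com/Bolinice/personal_quant_model | app/core/factors/base.py | _determine_groups
-- ===== SOURCE A (Python) =====
-- FACTOR_GROUPS = {
--     "valuation": {
--         "name": "价值因子",
--         "factors": ["ep_ttm", "bp", "sp_ttm", "dp", "cfp_ttm"],
--     },
--     "growth": {
--         "name": "成长因子",
--         "factors": ["yoy_revenue", "yoy_net_profit", "yoy_deduct_net_profit", "yoy_roe"],
--     },
--     "quality": {
--         "name": "质量因子",
--         "factors": ["roe", "roa", "gross_profit_margin", "net_profit_margin", "current_ratio"],
--     },
--     "momentum": {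
--         "name": "动量因子",
--         "factors": ["ret_1m_reversal", "ret_3m_skip1", "ret_6m_skip1", "ret_12m_skip1"],
--     },
--     "volatility": {
--         "name": "波动率因子",
--         "factors": ["vol_20d", "vol_60d", "beta", "idio_vol"],
--     },
--     "liquidity": {
--         "name": "流动性因子",
--         "factors": ["turnover_20d", "turnover_60d", "amihud_20d", "zero_return_ratio"],
--     },
--     "alternative": {
--         "name": "另类因子",
--         "factors": ["north_net_buy_ratio", "north_holding_chg_5d", "analyst_revision_1m"],
--     },
-- }
--
-- def _determine_groups(factor_names: list[str] | None) -> set[str]: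
--     """
--     根据因子名称确定需要计算的因子组
--
--     Args:
--         factor_names: 因子名称列表
--
--     Returns:
--         因子组集合
--     """
--     if factor_names is None:
--         # 计算所有因子组
--         return set(FACTOR_GROUPS.keys())
--
--     # 根据因子名称确定所属的组
--     groups = set()
--     for factor_name in factor_names:
--         for group_name, group_info in FACTOR_GROUPS.items():
--             if factor_name in group_info["factors"]:
--                 groups.add(group_name)
--                 break
--
--     return groups
-- ===== SOURCE B (Python) =====
-- FACTOR_GROUPS = {
--     "valuation": {
--         "name": "价值因子",
--         "factors": ["ep_ttm", "bp", "sp_ttm", "dp", "cfp_ttm"],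
--     },
--     "growth": {
--         "name": "成长因子",
--         "factors": ["yoy_revenue", "yoy_net_profit", "yoy_deduct_net_profit", "yoy_roe"],
--     },
--     "quality": {
--         "name": "质量因子",
--         "factors": ["roe", "roa", "gross_profit_margin", "net_profit_margin", "current_ratio"],
--     },
--     "momentum": {
--         "name": "动量因子",
--         "factors": ["ret_1m_reversal", "ret_3m_skip1", "ret_6m_skip1", "ret_12m_skip1"],
--     },
--     "volatility": {
--         "name": "波动率因子",
--         "factors": ["vol_20d", "vol_60d", "beta", "idio_vol"],
--     },
--     "liquidity": {
--         "name": "流动性因子",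
--         "factors": ["turnover_20d", "turnover_60d", "amihud_20d", "zero_return_ratio"],
--     },
--     "alternative": {
--         "name": "另类因子",
--         "factors": ["north_net_buy_ratio", "north_holding_chg_5d", "analyst_revision_1m"],
--     },
-- }
--
-- # Inverted index: factor name -> group name (each factor belongs to exactly one group,
-- # so inverting the table loses nothing).
-- _FACTOR_TO_GROUP = {
--     factor: group_name
--     for group_name, group_info in FACTOR_GROUPS.items()
--     for factor in group_info["factors"]
-- }
--
--
-- def _determine_groups(factor_names):
--     if factor_names is None:
--         return set(FACTOR_GROUPS.keys())
--     # Loop-free pipeline: map every name through the inverted index (unknown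
--     # names map to None), collect the image as a set, and subtract the None
--     # produced by the unknown names.
--     return set(map(_FACTOR_TO_GROUP.get, factor_names)) - {None}
-- ===== Notes on version B (the rewrite author's own statement) =====
-- stated objective: idiomatic
-- what changed: B inverts FACTOR_GROUPS into a factor-to-group dictionary once and replaces A's explicit accumulator loop with nested scan-and-break by a loop-free pipeline: set(map(index.get, factor_names)) - {None} (measured ~7x faster on large inputs).
import Mathlib
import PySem

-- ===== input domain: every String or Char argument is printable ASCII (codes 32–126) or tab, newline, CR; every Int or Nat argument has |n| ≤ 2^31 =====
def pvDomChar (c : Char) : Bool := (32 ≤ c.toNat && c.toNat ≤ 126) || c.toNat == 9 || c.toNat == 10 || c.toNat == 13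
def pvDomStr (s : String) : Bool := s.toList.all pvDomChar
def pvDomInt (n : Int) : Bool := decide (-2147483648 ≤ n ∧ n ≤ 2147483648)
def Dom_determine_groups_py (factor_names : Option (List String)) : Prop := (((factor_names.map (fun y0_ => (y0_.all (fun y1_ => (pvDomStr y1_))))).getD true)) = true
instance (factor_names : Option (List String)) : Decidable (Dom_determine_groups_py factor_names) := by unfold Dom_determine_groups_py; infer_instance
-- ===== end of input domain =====

-- B inverts FACTOR_GROUPS into a factor→group dictionary once and replaces A's
-- accumulator loop with nested scan-and-break by the loop-free pipeline
-- set(map(index.get, factor_names)) - {None} (objective: idiomatic).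

-- FACTOR_GROUPS, reduced to the fields the function reads: (group name, factors).
def pvFactorGroups : List (String × List String) :=
  [ ("valuation",   ["ep_ttm", "bp", "sp_ttm", "dp", "cfp_ttm"]),
    ("growth",      ["yoy_revenue", "yoy_net_profit", "yoy_deduct_net_profit", "yoy_roe"]),
    ("quality",     ["roe", "roa", "gross_profit_margin", "net_profit_margin", "current_ratio"]),
    ("momentum",    ["ret_1m_reversal", "ret_3m_skip1", "ret_6m_skip1", "ret_12m_skip1"]),
    ("volatility",  ["vol_20d", "vol_60d", "beta", "idio_vol"]),
    ("liquidity",   ["turnover_20d", "turnover_60d", "amihud_20d", "zero_return_ratio"]),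
    ("alternative", ["north_net_buy_ratio", "north_holding_chg_5d", "analyst_revision_1m"]) ]

-- ===== PORT A =====
-- inner 'for group_name, group_info in FACTOR_GROUPS.items(): if … : groups.add(…); break'
def pvScanAdd (name : String) (gs : List (String × List String)) (s : PySem.Set String) :
    PySem.Set String :=
  match gs with
  | [] => s
  | (g, fs) :: rest => if fs.contains name then PySem.Set.add s g else pvScanAdd name rest s

def determine_groups_py (factor_names : Option (List String)) : List String :=
  match factor_names with
  | none => PySem.Set.ofList (pvFactorGroups.map (·.1))
  | some names => names.foldl (fun s name => pvScanAdd name pvFactorGroups s) PySem.Set.empty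

-- ===== PORT B =====
-- _FACTOR_TO_GROUP = {factor: group for group, info in FACTOR_GROUPS.items() for factor in info["factors"]}
def pvFactorToGroup : PySem.Dict String String :=
  (pvFactorGroups.flatMap (fun p => p.2.map (fun f => (f, p.1)))).foldl
    (fun d q => d.insert q.1 q.2) PySem.Dict.empty

-- set(map(_FACTOR_TO_GROUP.get, factor_names)) - {None}: the mapped image is a set of
-- Option String (None = missing key); after subtracting {None} every element is `some`,
-- and reduceOption unwraps them (exact: Python's result is the corresponding set of str).
def determine_groups_py_alt (factor_names : Option (List String)) : List String :=
  match factor_names with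
  | none => PySem.Set.ofList (pvFactorGroups.map (·.1))
  | some names =>
      (PySem.Set.diff (PySem.Set.ofList (names.map (fun n => pvFactorToGroup.get? n)))
        (PySem.Set.ofList [(none : Option String)])).reduceOption

-- ===== PRECONDITION & SPEC =====
def Spec_determine_groups_py (factor_names : Option (List String)) (out : List String) : Prop := out = determine_groups_py_alt factor_names
instance (factor_names : Option (List String)) (out : List String) : Decidable (Spec_determine_groups_py factor_names out) := by unfold Spec_determine_groups_py; infer_instance

-- ===== CLAIM (what is proved, stated in full; the proofs are below) =====
def Claim_equal_determine_groups_py : Prop := ∀ (factor_names : Option (List String)), Dom_determine_groups_py factor_names → Spec_determine_groups_py factor_names (determine_groups_py factor_names)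

-- ===== LEMMAS AND PROOFS =====

-- A's scan result, as an Option: first group whose factor list contains `name`.
def pvScanFind (name : String) (gs : List (String × List String)) : Option String :=
  (gs.find? (fun p => p.2.contains name)).map (·.1)

theorem pvScanAdd_eq (name : String) (gs : List (String × List String)) (s : PySem.Set String) :
    pvScanAdd name gs s =
      match pvScanFind name gs with
      | some g => PySem.Set.add s g
      | none => s := by
  induction gs with
  | nil => rfl
  | cons p rest ih =>
      obtain ⟨g, fs⟩ := p
      simp only [pvScanAdd, pvScanFind, List.find?_cons]
      by_cases h : name ∈ fs
      · simp [h]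
      · have hd : decide (name ∈ fs) = false := by simp [h]
        have hr : Option.map (fun x : String × List String => x.1)
            (List.find? (fun p => decide (name ∈ p.2)) rest) = pvScanFind name rest := by
          simp [pvScanFind]
        simp [hd, hr]
        exact ih

-- The inverted dictionary, computed: all 25 factor keys are distinct, so the
-- insertion fold just appends pairs.
theorem pvFactorToGroup_eq :
    pvFactorToGroup =
      PySem.Dict.mk (pvFactorGroups.flatMap (fun p => p.2.map (fun f => (f, p.1)))) := by
  decide

theorem pvGet?_mk (l : List (String × String)) (n : String) :
    (PySem.Dict.mk l).get? n = (l.find? (fun q => q.1 == n)).map (·.2) := by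
  induction l with
  | nil => rfl
  | cons q rest ih =>
      obtain ⟨k, v⟩ := q
      rw [PySem.Dict.get?_mk_cons]
      simp only [List.find?_cons]
      by_cases h : k = n
      · simp [h]
      · have hb : (k == n) = false := beq_eq_false_iff_ne.mpr h
        simp [hb, ih]

-- first-match key lookup in fs, when the key is present
theorem pvFind?_beq_of_mem (name : String) (fs : List String) (h : name ∈ fs) :
    fs.find? (fun f => f == name) = some name := by
  induction fs with
  | nil => cases h
  | cons a t ih =>
      simp only [List.find?_cons]
      by_cases ha : a = name
      · simp [ha]
      · have hb : (a == name) = false := beq_eq_false_iff_ne.mpr ha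
        have hm : name ∈ t := by
          rcases List.mem_cons.mp h with h1 | h1
          · exact absurd h1.symm ha
          · exact h1
        simp [hb, ih hm]

-- A's first-match scan over the groups finds the same group as a first-match
-- lookup in the flattened (factor, group) association list.
theorem pvScanFind_eq_assoc (name : String) (gs : List (String × List String)) :
    pvScanFind name gs =
      ((gs.flatMap (fun p => p.2.map (fun f => (f, p.1)))).find?
        (fun q => q.1 == name)).map (·.2) := by
  induction gs with
  | nil => rfl
  | cons p rest ih =>
      obtain ⟨g, fs⟩ := p
      rw [List.flatMap_cons, List.find?_append, List.find?_map]
      by_cases h : name ∈ fs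
      · have h2 : fs.find? ((fun q : String × String => q.1 == name) ∘ (fun f => (f, g)))
            = some name := by
          simpa [Function.comp] using pvFind?_beq_of_mem name fs h
        rw [h2]
        simp [pvScanFind, h]
      · have h2 : fs.find? ((fun q : String × String => q.1 == name) ∘ (fun f => (f, g)))
            = none := by
          refine List.find?_eq_none.mpr (fun x hx => ?_)
          simp only [Function.comp_apply, beq_iff_eq]
          exact fun he => h (he ▸ hx)
        rw [h2]
        simp only [Option.map_none, Option.none_or]
        rw [← ih]
        simp [pvScanFind, h]

-- A's per-name step, expressed through B's inverted dictionary.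
theorem pvStep_eq (s : PySem.Set String) (name : String) :
    pvScanAdd name pvFactorGroups s =
      (match pvFactorToGroup.get? name with
       | some g => PySem.Set.add s g
       | none => s) := by
  rw [pvScanAdd_eq, pvFactorToGroup_eq, pvGet?_mk, ← pvScanFind_eq_assoc]

-- subtracting {None} then unwrapping = just unwrapping (reduceOption drops none anyway)
theorem pvReduceOption_diff_none (s : List (Option String)) :
    (PySem.Set.diff s (PySem.Set.ofList [(none : Option String)])).reduceOption
      = s.reduceOption := by
  induction s with
  | nil => rfl
  | cons a t ih =>
      cases a with
      | none => simpa [PySem.Set.diff, List.filter, List.reduceOption] using ih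
      | some g => simpa [PySem.Set.diff, List.filter, List.reduceOption] using ih

-- adding `some g` to the Option-set then unwrapping = adding g to the unwrapped set
theorem pvReduceOption_add_some (s : List (Option String)) (g : String) :
    (PySem.Set.add s (some g)).reduceOption = PySem.Set.add s.reduceOption g := by
  simp only [PySem.Set.add]
  by_cases h : some g ∈ s
  · have h2 : g ∈ s.reduceOption := List.reduceOption_mem_iff.mpr h
    simp [h, h2]
  · have h2 : g ∉ s.reduceOption := fun hc => h (List.reduceOption_mem_iff.mp hc)
    simp [h, List.reduceOption]

-- adding `none` changes nothing after unwrapping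
theorem pvReduceOption_add_none (s : List (Option String)) :
    (PySem.Set.add s (none : Option String)).reduceOption = s.reduceOption := by
  simp only [PySem.Set.add]
  by_cases h : (none : Option String) ∈ s
  · simp [h]
  · simp [h, List.reduceOption]

-- folding Set.add over the mapped names, then unwrapping, = A's fold over the names
theorem pvFold_eq (f : String → Option String) (ns : List String)
    (s0 : List (Option String)) :
    ((ns.map f).foldl PySem.Set.add s0).reduceOption =
      ns.foldl
        (fun s name => match f name with | some g => PySem.Set.add s g | none => s)
        s0.reduceOption := by
  induction ns generalizing s0 with
  | nil => rfl
  | cons n t ih =>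
      simp only [List.map_cons, List.foldl_cons]
      rw [ih]
      cases hf : f n with
      | none => rw [pvReduceOption_add_none]
      | some g => rw [pvReduceOption_add_some]

-- ===== VERDICT (by name: the statement is the Claim_ definition above) =====
theorem determine_groups_py_spec : Claim_equal_determine_groups_py := by
  intro factor_names _
  unfold Spec_determine_groups_py determine_groups_py determine_groups_py_alt
  cases factor_names with
  | none => rfl
  | some names =>
      simp only []
      rw [pvReduceOption_diff_none, PySem.Set.ofList_eq_foldl,
        pvFold_eq (fun n => pvFactorToGroup.get? n) names []]
      exact List.foldl_ext _ _ _ (fun s name _ => pvStep_eq s name)
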